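-- pv_equiv track=rewrite | github.com/Justagwas/MediaCrate | MediaCrate/mediacrate/ui/main_window.py | _plan_batch_layout_inserts
-- ===== SOURCE A (Python) =====
-- def _plan_batch_layout_inserts(current_ids: list[str], target_ids: list[str]) -> list[tuple[int, str]] | None:
--     current_idx = 0
--     current_known = set(current_ids)
--     inserts: list[tuple[int, str]] = []
--     for target_idx, entry_id in enumerate(target_ids):
--         if current_idx < len(current_ids) and entry_id == current_ids[current_idx]:
--             current_idx += 1
--             continue
--         if entry_id in current_known:
--             return None
--         inserts.append((target_idx, entry_id))
--     if current_idx != len(current_ids):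
--         return None
--     return inserts
-- ===== SOURCE B (Python) =====
-- def _plan_batch_layout_inserts(current_ids: list[str], target_ids: list[str]) -> list[tuple[int, str]] | None:
--     current_known = set(current_ids)
--     inserts = [(i, e) for i, e in enumerate(target_ids) if e not in current_known]
--     remaining = [e for e in target_ids if e in current_known]
--     if remaining != current_ids:
--         return None
--     return inserts
-- ===== Notes on version B (the rewrite author's own statement) =====
-- stated objective: simpler
-- what changed: Replaces A's single interleaved two-pointer scan (mutable pointer, mid-loop None returns, trailing consumption check) with two independent filtered passes over target_ids plus one list-equality validation against current_ids.
import Mathlib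
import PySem

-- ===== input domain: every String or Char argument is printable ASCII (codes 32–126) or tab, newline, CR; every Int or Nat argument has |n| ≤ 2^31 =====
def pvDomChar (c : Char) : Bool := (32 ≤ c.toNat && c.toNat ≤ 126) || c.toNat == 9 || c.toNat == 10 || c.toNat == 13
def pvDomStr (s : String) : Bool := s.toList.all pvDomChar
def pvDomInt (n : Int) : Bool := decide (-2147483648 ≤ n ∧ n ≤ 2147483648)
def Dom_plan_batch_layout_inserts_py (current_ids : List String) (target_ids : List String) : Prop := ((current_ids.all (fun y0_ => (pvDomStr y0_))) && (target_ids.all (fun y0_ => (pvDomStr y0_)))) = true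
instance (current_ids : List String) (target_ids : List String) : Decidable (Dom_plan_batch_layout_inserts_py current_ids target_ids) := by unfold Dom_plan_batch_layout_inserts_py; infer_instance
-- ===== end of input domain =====

-- B replaces A's interleaved two-pointer scan with two filtered passes and one equality check (objective: simpler).
-- ===== PORT A =====
def planALoop (current : List String) (known : PySem.Set String) :
    List String → Int → Nat → List (Int × String) → Option (List (Int × String))
  | [], _, cidx, acc => if cidx = current.length then some acc else none
  | e :: rest, t, cidx, acc =>
    if cidx < current.length ∧ e = current.getD cidx "" then
      planALoop current known rest (t + 1) (cidx + 1) acc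
    else if known.contains e then none
    else planALoop current known rest (t + 1) cidx (acc ++ [(t, e)])

def plan_batch_layout_inserts_py (current_ids : List String) (target_ids : List String) : Option (List (Int × String)) :=
  planALoop current_ids (PySem.Set.ofList current_ids) target_ids 0 0 []

-- ===== PORT B =====
def plan_batch_layout_inserts_py_alt (current_ids : List String) (target_ids : List String) : Option (List (Int × String)) :=
  let known : PySem.Set String := PySem.Set.ofList current_ids
  let inserts := (PySem.List.enumerate target_ids).filter (fun p => !(known.contains p.2))
  let remaining := target_ids.filter (fun e => known.contains e)
  if remaining ≠ current_ids then none else some inserts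

-- ===== PRECONDITION & SPEC =====
def Spec_plan_batch_layout_inserts_py (current_ids : List String) (target_ids : List String) (out : Option (List (Int × String))) : Prop := out = plan_batch_layout_inserts_py_alt current_ids target_ids
instance (current_ids : List String) (target_ids : List String) (out : Option (List (Int × String))) : Decidable (Spec_plan_batch_layout_inserts_py current_ids target_ids out) := by unfold Spec_plan_batch_layout_inserts_py; infer_instance

-- ===== CLAIM (what is proved, stated in full; the proofs are below) =====
def Claim_equal_plan_batch_layout_inserts_py : Prop := ∀ (current_ids : List String) (target_ids : List String), Dom_plan_batch_layout_inserts_py current_ids target_ids → Spec_plan_batch_layout_inserts_py current_ids target_ids (plan_batch_layout_inserts_py current_ids target_ids)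

-- ===== LEMMAS AND PROOFS =====
lemma contains_ofList_eq (current : List String) (e : String) :
    (PySem.Set.ofList current).contains e = current.contains e := by
  simp [PySem.Set.contains_eq_listContains, PySem.Set.mem_ofList]

-- Loop invariant: A's loop with pointer at cidx succeeds iff the known-filtered suffix of target
-- equals current.drop cidx, and then returns acc ++ the enumerate-filtered inserts.
lemma planALoop_eq (current : List String) (target : List String) :
    ∀ (t : Int) (cidx : Nat) (acc : List (Int × String)), cidx ≤ current.length →
    planALoop current (PySem.Set.ofList current) target t cidx acc =
      if target.filter (fun e => (PySem.Set.ofList current).contains e) = current.drop cidx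
      then some (acc ++ (PySem.List.enumerate target t).filter
                   (fun p => !((PySem.Set.ofList current).contains p.2)))
      else none := by
  induction target with
  | nil =>
    intro t cidx acc hle
    simp only [planALoop, List.filter_nil, PySem.List.enumerate_nil, List.append_nil]
    by_cases h : cidx = current.length
    · simp [h, List.drop_length]
    · have : current.drop cidx ≠ [] := by
        intro hd
        have := List.drop_eq_nil_iff.mp hd
        omega
      simp [h, Ne.symm this]
  | cons e rest ih =>
    intro t cidx acc hle
    rw [planALoop]
    by_cases h1 : cidx < current.length ∧ e = current.getD cidx ""
    · obtain ⟨hlt, heq⟩ := h1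
      have hget : e = current[cidx] := by rwa [List.getD_eq_getElem _ _ hlt] at heq
      have hmem : e ∈ current := hget ▸ List.getElem_mem hlt
      have hcont : (PySem.Set.ofList current).contains e = true := by
        rw [contains_ofList_eq]; exact List.contains_iff_mem.mpr hmem
      have hdrop : current.drop cidx = current[cidx] :: current.drop (cidx + 1) :=
        List.drop_eq_getElem_cons hlt
      rw [if_pos ⟨hlt, heq⟩, ih (t + 1) (cidx + 1) acc (by omega)]
      simp only [List.filter_cons, hcont, PySem.List.enumerate_cons, hdrop, ← hget,
        if_pos, Bool.not_true, Bool.false_eq_true, if_false, List.cons.injEq, true_and]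
    · rw [if_neg h1]
      by_cases h2 : (PySem.Set.ofList current).contains e = true
      · rw [if_pos h2]
        have hne : e :: rest.filter (fun x => (PySem.Set.ofList current).contains x)
            ≠ current.drop cidx := by
          rcases Nat.lt_or_ge cidx current.length with hlt | hge
          · rw [List.drop_eq_getElem_cons hlt]
            intro hc
            have : e = current[cidx] := (List.cons.injEq _ _ _ _ ▸ hc).1
            exact h1 ⟨hlt, by rw [List.getD_eq_getElem _ _ hlt]; exact this⟩
          · have : current.drop cidx = [] := List.drop_eq_nil_iff.mpr (by omega)
            rw [this]; simp
        simp only [List.filter_cons, h2, if_pos]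
        rw [if_neg hne]
      · rw [if_neg h2, ih (t + 1) cidx (acc ++ [(t, e)]) hle]
        have h2' : (PySem.Set.ofList current).contains e = false := by
          simpa using h2
        simp only [List.filter_cons, h2', PySem.List.enumerate_cons, Bool.not_false,
          Bool.false_eq_true, if_false, if_pos, List.append_assoc, List.singleton_append]

-- ===== VERDICT (by name: the statement is the Claim_ definition above) =====
theorem plan_batch_layout_inserts_py_spec : Claim_equal_plan_batch_layout_inserts_py := by
  intro current target _
  unfold Spec_plan_batch_layout_inserts_py plan_batch_layout_inserts_py plan_batch_layout_inserts_py_alt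
  rw [planALoop_eq current target 0 0 [] (Nat.zero_le _)]
  simp only [List.drop_zero, List.nil_append]
  by_cases h : target.filter (fun e => (PySem.Set.ofList current).contains e) = current
  · simp
  · simp
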